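-- pv_equiv track=rewrite | github.com/satriotsubasa/PowerPlatform-Core | scripts/review_flow_connectors.py | build_recommendations
-- ===== SOURCE A (Python) =====
-- from typing import Any
--
-- def build_recommendations(findings: list[dict[str, Any]]) -> list[str]:
--     recommendations = []
--     codes = {finding["code"] for finding in findings}
--     if any(code.startswith("dataverse-list-") for code in codes):
--         recommendations.append("For Dataverse list actions, prefer explicit select columns, filters, and row limits.")
--     if any(code.startswith("sharepoint-list-") for code in codes):
--         recommendations.append("For SharePoint list actions, prefer explicit filters and top limits to avoid broad reads.")
--     if any(code.startswith("outlook-send-") for code in codes):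
--         recommendations.append("For Outlook send actions, keep recipients and subjects explicit and review environment-specific recipients.")
--     return recommendations
-- ===== SOURCE B (Python) =====
-- def build_recommendations(findings):
--     has_dataverse = has_sharepoint = has_outlook = False
--     for finding in findings:
--         code = finding["code"]
--         has_dataverse = has_dataverse or code.startswith("dataverse-list-")
--         has_sharepoint = has_sharepoint or code.startswith("sharepoint-list-")
--         has_outlook = has_outlook or code.startswith("outlook-send-")
--     recommendations = []
--     if has_dataverse:
--         recommendations.append("For Dataverse list actions, prefer explicit select columns, filters, and row limits.")
--     if has_sharepoint:
--         recommendations.append("For SharePoint list actions, prefer explicit filters and top limits to avoid broad reads.")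
--     if has_outlook:
--         recommendations.append("For Outlook send actions, keep recipients and subjects explicit and review environment-specific recipients.")
--     return recommendations
-- ===== Notes on version B (the rewrite author's own statement) =====
-- stated objective: simpler
-- what changed: Replaces the intermediate set comprehension and three separate any()-scans with a single pass that accumulates three boolean flags and then emits the fixed messages.
import Mathlib
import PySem

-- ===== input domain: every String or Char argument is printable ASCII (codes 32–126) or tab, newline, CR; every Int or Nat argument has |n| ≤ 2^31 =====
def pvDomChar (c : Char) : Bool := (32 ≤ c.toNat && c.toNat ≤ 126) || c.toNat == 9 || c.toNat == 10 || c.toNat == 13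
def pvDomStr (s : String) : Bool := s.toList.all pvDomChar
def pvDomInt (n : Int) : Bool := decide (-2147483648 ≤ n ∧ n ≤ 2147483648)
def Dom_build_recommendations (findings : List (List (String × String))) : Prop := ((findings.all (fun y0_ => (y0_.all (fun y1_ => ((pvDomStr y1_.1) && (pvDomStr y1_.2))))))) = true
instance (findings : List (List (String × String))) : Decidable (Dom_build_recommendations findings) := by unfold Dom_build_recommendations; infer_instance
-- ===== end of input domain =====

-- B replaces A's intermediate set and three any()-scans with one pass accumulating three boolean flags (objective: simpler).


def pvMsg1 : String := "For Dataverse list actions, prefer explicit select columns, filters, and row limits."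
def pvMsg2 : String := "For SharePoint list actions, prefer explicit filters and top limits to avoid broad reads."
def pvMsg3 : String := "For Outlook send actions, keep recipients and subjects explicit and review environment-specific recipients."

-- ===== PORT A =====
-- finding["code"] → Dict.get? … "code"; under Pre_ the key is present, so getD "" never fires.
def build_recommendations (findings : List (List (String × String))) : List String :=
  let recommendations : List String := []
  let codes : PySem.Set String :=
    PySem.Set.ofList (findings.map (fun finding => (finding.lookup "code").getD ""))
  let recommendations :=
    if codes.any (fun code => PySem.Str.startswith code "dataverse-list-") then
      recommendations ++ [pvMsg1] else recommendations
  let recommendations :=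
    if codes.any (fun code => PySem.Str.startswith code "sharepoint-list-") then
      recommendations ++ [pvMsg2] else recommendations
  let recommendations :=
    if codes.any (fun code => PySem.Str.startswith code "outlook-send-") then
      recommendations ++ [pvMsg3] else recommendations
  recommendations

-- ===== PORT B =====
def build_recommendations_alt (findings : List (List (String × String))) : List String :=
  let flags : Bool × Bool × Bool :=
    findings.foldl (fun fl finding =>
      let code := (finding.lookup "code").getD ""
      (fl.1 || PySem.Str.startswith code "dataverse-list-",
       fl.2.1 || PySem.Str.startswith code "sharepoint-list-",
       fl.2.2 || PySem.Str.startswith code "outlook-send-")) (false, false, false)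
  (if flags.1 then [pvMsg1] else []) ++
  (if flags.2.1 then [pvMsg2] else []) ++
  (if flags.2.2 then [pvMsg3] else [])

-- ===== PRECONDITION & SPEC =====
-- Pre_ excludes findings lacking a "code" key, on which A raises KeyError.
def Pre_build_recommendations (findings : List (List (String × String))) : Prop :=
  ∀ finding ∈ findings, (finding.lookup "code").isSome
instance (findings : List (List (String × String))) : Decidable (Pre_build_recommendations findings) := by unfold Pre_build_recommendations; infer_instance
def pvWitness_build_recommendations : (List (List (String × String))) :=
  [[("code", "dataverse-list-rows")], [("code", "other")]]
def Spec_build_recommendations (findings : List (List (String × String))) (out : List String) : Prop := out = build_recommendations_alt findings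
instance (findings : List (List (String × String))) (out : List String) : Decidable (Spec_build_recommendations findings out) := by unfold Spec_build_recommendations; infer_instance

-- ===== CLAIM (what is proved, stated in full; the proofs are below) =====
def Claim_equal_build_recommendations : Prop := ∀ (findings : List (List (String × String))), Dom_build_recommendations findings → Pre_build_recommendations findings → Spec_build_recommendations findings (build_recommendations findings)

-- ===== LEMMAS AND PROOFS =====
theorem pv_set_any (xs : List String) (p : String → Bool) :
    (PySem.Set.ofList xs).any p = xs.any p := by
  apply Bool.eq_iff_iff.mpr
  simp only [List.any_eq_true]
  constructor
  · rintro ⟨c, hc, hp⟩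
    exact ⟨c, (PySem.Set.mem_ofList _ _).1 hc, hp⟩
  · rintro ⟨c, hc, hp⟩
    exact ⟨c, (PySem.Set.mem_ofList _ _).2 hc, hp⟩

theorem pv_fold_flags (xs : List (List (String × String))) (a b c : Bool) :
    xs.foldl (fun fl finding =>
      let code := (finding.lookup "code").getD ""
      (fl.1 || PySem.Str.startswith code "dataverse-list-",
       fl.2.1 || PySem.Str.startswith code "sharepoint-list-",
       fl.2.2 || PySem.Str.startswith code "outlook-send-")) (a, b, c) =
    (a || (xs.map (fun (f : List (String × String)) => (f.lookup "code").getD "")).any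
            (fun code => PySem.Str.startswith code "dataverse-list-"),
     b || (xs.map (fun (f : List (String × String)) => (f.lookup "code").getD "")).any
            (fun code => PySem.Str.startswith code "sharepoint-list-"),
     c || (xs.map (fun (f : List (String × String)) => (f.lookup "code").getD "")).any
            (fun code => PySem.Str.startswith code "outlook-send-")) := by
  induction xs generalizing a b c with
  | nil => simp
  | cons x xs ih =>
    simp only [List.foldl_cons, List.map_cons, List.any_cons, ih]
    simp [Bool.or_assoc]

-- ===== VERDICT (by name: the statement is the Claim_ definition above) =====
theorem build_recommendations_spec : Claim_equal_build_recommendations := by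
  intro findings _ _
  unfold Spec_build_recommendations build_recommendations build_recommendations_alt
  rw [pv_fold_flags]
  simp only [pv_set_any, Bool.false_or]
  split_ifs <;> simp_all
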